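-- pv_equiv track=rewrite | github.com/EPICS-SCAN/SCAN-Documents | SyncVis.py | find_valid_start
-- ===== SOURCE A (Python) =====
-- def find_valid_start(times, distances, threshold=220, min_duration_ms=1000):
--     """
--     Find the first point where distance > threshold for at least min_duration_ms.
--     Returns the index of the start point.
--     """
--     max_stretch = 0
--     current_start = None
--     current_start_time = None
--     best_start_idx = None
--
--     for i in range(len(times)):
--         if distances[i] > threshold:
--             if current_start is None:
--                 current_start = i
--                 current_start_time = times[i]
--             current_stretch = times[i] - current_start_time
--             if current_stretch > max_stretch:
--                 max_stretch = current_stretch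
--                 best_start_idx = current_start
--         else:
--             current_start = None
--             current_start_time = None
--
--     if max_stretch >= min_duration_ms:
--         return best_start_idx
--     return None
-- ===== SOURCE B (Python) =====
-- def find_valid_start(times, distances, threshold=220, min_duration_ms=1000):
--     """
--     Two-pass re-implementation: first partition indices into maximal runs where
--     distances[i] > threshold (recording each run's start and the max of
--     times[i] - times[start]); then select the run with the largest stretch
--     (earliest run wins ties) and apply the min_duration_ms gate.
--     """
--     n = len(times)
--     runs = []  # (start index, max stretch within the run)
--     i = 0
--     while i < n:
--         if distances[i] > threshold:
--             s = i
--             m = 0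
--             i += 1
--             while i < n and distances[i] > threshold:
--                 m = max(m, times[i] - times[s])
--                 i += 1
--             runs.append((s, m))
--         else:
--             i += 1
--     best_m = 0
--     best = None
--     for s, m in runs:
--         if m > best_m:
--             best_m = m
--             best = s
--     if best_m >= min_duration_ms:
--         return best
--     return None
-- ===== Notes on version B (the rewrite author's own statement) =====
-- stated objective: alternative
-- what changed: A's single scan with inline run/best bookkeeping is replaced by a two-pass decomposition: first build the list of maximal above-threshold runs (start index, max stretch), then a separate selection fold picks the run with the largest stretch (earliest wins) before applying the min_duration_ms gate.
import Mathlib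
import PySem

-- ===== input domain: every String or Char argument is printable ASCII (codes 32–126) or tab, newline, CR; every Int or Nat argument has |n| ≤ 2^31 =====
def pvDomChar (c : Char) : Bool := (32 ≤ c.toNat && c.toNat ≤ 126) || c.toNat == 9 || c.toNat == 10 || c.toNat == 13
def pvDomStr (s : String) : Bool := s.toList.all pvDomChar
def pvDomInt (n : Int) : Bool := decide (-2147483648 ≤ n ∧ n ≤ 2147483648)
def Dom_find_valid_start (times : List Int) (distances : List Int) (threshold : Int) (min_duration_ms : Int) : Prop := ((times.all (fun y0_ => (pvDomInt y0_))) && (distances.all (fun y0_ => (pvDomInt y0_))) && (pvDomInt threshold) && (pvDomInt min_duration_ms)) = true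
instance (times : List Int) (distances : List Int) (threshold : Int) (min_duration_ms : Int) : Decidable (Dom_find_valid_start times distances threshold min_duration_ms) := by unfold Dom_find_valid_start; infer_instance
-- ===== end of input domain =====

-- B replaces A's inline single-scan bookkeeping by a two-pass decomposition
-- (build the maximal above-threshold runs, then a separate selection reduction);
-- objective: alternative structure, same O(n) cost.

-- ===== PORT A =====
-- A's `for i in range(len(times))` with accesses times[i], distances[i] is the
-- structural walk of the two lists side by side carrying the index i (exact under
-- Pre_, which excludes the IndexError case len(distances) < len(times)).
-- current_start / current_start_time are None / set together in the Python, so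
-- they travel as one Option (start index, start time) pair.
def fvsA_loop (threshold : Int) :
    List Int → List Int → Nat → Int → Option (Int × Int) → Option Int →
    Int × Option (Int × Int) × Option Int
  | t :: ts, ds0, i, maxS, cur, best =>
    match ds0 with
    | d :: ds =>
      if d > threshold then
        let c : Int × Int := match cur with
          | none => ((i : Int), t)
          | some c => c
        let stretch := t - c.2
        if stretch > maxS then
          fvsA_loop threshold ts ds (i+1) stretch (some c) (some c.1)
        else
          fvsA_loop threshold ts ds (i+1) maxS (some c) best
      else
        fvsA_loop threshold ts ds (i+1) maxS none best
    | [] => (maxS, cur, best)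
  | [], _, _, maxS, cur, best => (maxS, cur, best)

def find_valid_start (times : List Int) (distances : List Int) (threshold : Int) (min_duration_ms : Int) : Option Int :=
  let r := fvsA_loop threshold times distances 0 0 none none
  if r.1 ≥ min_duration_ms then r.2.2 else none

-- ===== PORT B =====
-- B's nested whiles as the structural walk of the same two lists: fvsB_out is the
-- outer while (outside a run), fvsB_in the inner while (inside the run started at
-- index s with start time tstart, running max stretch m); when the inner while
-- exits, the finished run (s, m) is appended and control returns to the outer
-- while, exactly as in the Python.
mutual
def fvsB_out (threshold : Int) : List Int → List Int → Nat → List (Int × Int)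
  | t :: ts, d :: ds, i =>
    if d > threshold then
      fvsB_in threshold t (i : Int) 0 ts ds (i+1)
    else
      fvsB_out threshold ts ds (i+1)
  | _, _, _ => []

def fvsB_in (threshold tstart s m : Int) : List Int → List Int → Nat → List (Int × Int)
  | t :: ts, d :: ds, i =>
    if d > threshold then
      fvsB_in threshold tstart s (max m (t - tstart)) ts ds (i+1)
    else
      (s, m) :: fvsB_out threshold ts ds (i+1)
  | _, _, _ => [(s, m)]
end

-- second pass: pick the run with the largest stretch (earliest wins ties)
def fvsB_select (runs : List (Int × Int)) (bm : Int) (best : Option Int) : Int × Option Int :=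
  match runs with
  | [] => (bm, best)
  | (s, m) :: rest =>
    if m > bm then fvsB_select rest m (some s) else fvsB_select rest bm best

def find_valid_start_alt (times : List Int) (distances : List Int) (threshold : Int) (min_duration_ms : Int) : Option Int :=
  let runs := fvsB_out threshold times distances 0
  let r := fvsB_select runs 0 none
  if r.1 ≥ min_duration_ms then r.2 else none

-- ===== PRECONDITION & SPEC =====
-- Pre_ excludes exactly the inputs where the Python A raises IndexError:
-- distances shorter than times.
def Pre_find_valid_start (times : List Int) (distances : List Int) (threshold : Int) (min_duration_ms : Int) : Prop :=
  times.length ≤ distances.length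
instance (times : List Int) (distances : List Int) (threshold : Int) (min_duration_ms : Int) : Decidable (Pre_find_valid_start times distances threshold min_duration_ms) := by unfold Pre_find_valid_start; infer_instance

def pvWitness_find_valid_start : List Int × List Int × Int × Int := ([0, 1500], [300, 300], 220, 1000)

def Spec_find_valid_start (times : List Int) (distances : List Int) (threshold : Int) (min_duration_ms : Int) (out : Option Int) : Prop := out = find_valid_start_alt times distances threshold min_duration_ms
instance (times : List Int) (distances : List Int) (threshold : Int) (min_duration_ms : Int) (out : Option Int) : Decidable (Spec_find_valid_start times distances threshold min_duration_ms out) := by unfold Spec_find_valid_start; infer_instance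

-- ===== CLAIM (what is proved, stated in full; the proofs are below) =====
def Claim_equal_find_valid_start : Prop := ∀ (times : List Int) (distances : List Int) (threshold : Int) (min_duration_ms : Int), Dom_find_valid_start times distances threshold min_duration_ms → Pre_find_valid_start times distances threshold min_duration_ms → Spec_find_valid_start times distances threshold min_duration_ms (find_valid_start times distances threshold min_duration_ms)

-- ===== LEMMAS AND PROOFS =====

-- MUTUAL INVARIANT, proved by induction on the times list.
-- lemIn: while A is inside the run started at index s, its three-field state is
-- determined by the running max m that B's inner while keeps, and finishing the
-- scan from there yields B's selection fold over the remaining runs.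
-- lemOut: outside a run, A's scan computes B's selection fold over B's runs.
mutual
theorem lemIn (threshold tstart s m maxS : Int) (best : Option Int) :
    ∀ (ts ds : List Int) (i : Nat),
    ((fvsA_loop threshold ts ds i (max maxS m) (some (s, tstart)) (if m > maxS then some s else best)).1,
     (fvsA_loop threshold ts ds i (max maxS m) (some (s, tstart)) (if m > maxS then some s else best)).2.2)
      = fvsB_select (fvsB_in threshold tstart s m ts ds i) maxS best
  | t :: ts, d :: ds, i => by
    by_cases hd : d > threshold
    · simp only [fvsA_loop, fvsB_in, if_pos hd]
      have key := lemIn threshold tstart s (max m (t - tstart)) maxS best ts ds (i+1)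
      by_cases hgt : t - tstart > max maxS m
      · rw [if_pos hgt]
        rw [(by omega : max maxS (max m (t - tstart)) = t - tstart),
            if_pos (by omega : max m (t - tstart) > maxS)] at key
        exact key
      · rw [if_neg hgt]
        rw [(by omega : max maxS (max m (t - tstart)) = max maxS m)] at key
        by_cases hm : m > maxS
        · rw [if_pos hm]
          rw [if_pos (by omega : max m (t - tstart) > maxS)] at key
          exact key
        · rw [if_neg hm]
          rw [if_neg (by omega : ¬ max m (t - tstart) > maxS)] at key
          exact key
    · simp only [fvsA_loop, fvsB_in, if_neg hd, fvsB_select]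
      by_cases hm : m > maxS
      · simp only [if_pos hm, (by omega : max maxS m = m)]
        exact lemOut threshold ts ds (i+1) m (some s)
      · simp only [if_neg hm, (by omega : max maxS m = maxS)]
        exact lemOut threshold ts ds (i+1) maxS best
  | t :: ts, [], i => by
    simp only [fvsA_loop, fvsB_in, fvsB_select]
    by_cases hm : m > maxS
    · simp only [if_pos hm, (by omega : max maxS m = m)]
    · simp only [if_neg hm, (by omega : max maxS m = maxS)]
  | [], ds, i => by
    simp only [fvsA_loop, fvsB_in, fvsB_select]
    by_cases hm : m > maxS
    · simp only [if_pos hm, (by omega : max maxS m = m)]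
    · simp only [if_neg hm, (by omega : max maxS m = maxS)]

theorem lemOut (threshold : Int) :
    ∀ (ts ds : List Int) (i : Nat) (maxS : Int) (best : Option Int),
    ((fvsA_loop threshold ts ds i maxS none best).1,
     (fvsA_loop threshold ts ds i maxS none best).2.2)
      = fvsB_select (fvsB_out threshold ts ds i) maxS best
  | t :: ts, d :: ds, i, maxS, best => by
    by_cases hd : d > threshold
    · simp only [fvsA_loop, fvsB_out, if_pos hd, sub_self]
      have key := lemIn threshold t (i : Int) 0 maxS best ts ds (i+1)
      by_cases h0 : (0 : Int) > maxS
      · rw [if_pos h0]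
        rw [(by omega : max maxS 0 = 0), if_pos h0] at key
        exact key
      · rw [if_neg h0]
        rw [(by omega : max maxS 0 = maxS), if_neg h0] at key
        exact key
    · simp only [fvsA_loop, fvsB_out, if_neg hd]
      exact lemOut threshold ts ds (i+1) maxS best
  | t :: ts, [], i, maxS, best => by
    simp only [fvsA_loop, fvsB_out, fvsB_select]
  | [], ds, i, maxS, best => by
    simp only [fvsA_loop, fvsB_out, fvsB_select]
end

-- ===== VERDICT (by name: the statement is the Claim_ definition above) =====
theorem find_valid_start_spec : Claim_equal_find_valid_start := by
  intro times distances threshold min_duration_ms _ _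
  unfold Spec_find_valid_start find_valid_start find_valid_start_alt
  have h := lemOut threshold times distances 0 0 none
  have h1 := congrArg Prod.fst h
  have h2 := congrArg Prod.snd h
  simp only at h1 h2
  simp only [h1, h2]
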